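-- pv_equiv track=rewrite | github.com/AkshaySingh-DS/DSA_CP_Python | SortingSearching/Roti_prata.py | good
-- ===== SOURCE A (Python) =====
-- def good(currentmintime, p, cooks, ranks):
--     #prata made initially
--     pratcnt = 0
--
--     #logic to be good mid
--     for i in range(cooks):
--         t = 0; j = 1
--         while True:
--             t = t + (j * ranks[i])
--             j += 1
--             if currentmintime < t:
--                 break
--             pratcnt += 1
--
--     #return True if they are able to make  prta >= p
--     return pratcnt >= p
-- ===== SOURCE B (Python) =====
-- from math import isqrt
--
-- def good(currentmintime, p, cooks, ranks):
--     # Closed form per cook: cook of rank r makes its k-th prata at cumulative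
--     # time r*k*(k+1)//2, so it finishes max{k : r*k*(k+1)//2 <= T} pratas,
--     # computed directly with an integer square root instead of simulating.
--     total = 0
--     for i in range(cooks):
--         r = ranks[i]
--         if r <= currentmintime:
--             m = currentmintime // r
--             total += (isqrt(8 * m + 1) - 1) // 2
--     return total >= p
-- ===== Notes on version B (the rewrite author's own statement) =====
-- stated objective: faster
-- what changed: Replaces the per-cook while-loop that simulates prata after prata with a closed form: each cook of rank r makes max{k : r*k*(k+1)/2 <= T} pratas, computed via math.isqrt.
import Mathlib
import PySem

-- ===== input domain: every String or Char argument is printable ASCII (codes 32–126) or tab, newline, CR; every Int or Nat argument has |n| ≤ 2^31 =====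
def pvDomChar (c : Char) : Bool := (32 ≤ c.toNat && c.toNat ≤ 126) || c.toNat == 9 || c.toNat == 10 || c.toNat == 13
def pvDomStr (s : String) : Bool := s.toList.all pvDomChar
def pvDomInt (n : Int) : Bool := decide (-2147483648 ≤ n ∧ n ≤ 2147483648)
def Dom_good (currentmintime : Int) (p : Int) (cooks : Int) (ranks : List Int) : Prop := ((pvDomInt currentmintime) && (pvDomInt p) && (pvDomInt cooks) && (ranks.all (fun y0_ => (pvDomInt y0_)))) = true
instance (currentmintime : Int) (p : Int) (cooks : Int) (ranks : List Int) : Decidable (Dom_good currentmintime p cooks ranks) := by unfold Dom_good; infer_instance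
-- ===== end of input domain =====

-- B replaces A's per-cook prata-by-prata simulation loop with a closed form
-- (max k with r*k*(k+1)/2 ≤ T, via an integer square root); asymptotically faster.

-- ===== PORT A =====
-- A's inner `while True` loop; the fuel argument only makes the recursion total
-- (on Pre_good the loop breaks long before the fuel runs out; A diverges outside).
def goodLoop (cmt r : Int) : Nat → Int → Int → Int → Int
  | 0, _, _, cnt => cnt
  | fuel + 1, t, j, cnt =>
    let t' := t + j * r
    let j' := j + 1
    if cmt < t' then cnt
    else goodLoop cmt r fuel t' j' (cnt + 1)

def good (currentmintime : Int) (p : Int) (cooks : Int) (ranks : List Int) : Bool :=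
  let pratcnt := (List.range cooks.toNat).foldl
    (fun (cnt : Int) (i : Nat) =>
      goodLoop currentmintime ((PySem.List.pyGet? ranks (i : Int)).getD 0)
        (currentmintime.toNat + 2) 0 1 cnt) 0
  decide (p ≤ pratcnt)

-- ===== PORT B =====
def good_alt (currentmintime : Int) (p : Int) (cooks : Int) (ranks : List Int) : Bool :=
  let total := (List.range cooks.toNat).foldl
    (fun (acc : Int) (i : Nat) =>
      let r := (PySem.List.pyGet? ranks (i : Int)).getD 0
      if r ≤ currentmintime then
        let m := PySem.Int.floordiv currentmintime r
        acc + PySem.Int.floordiv ((Nat.sqrt (8 * m + 1).toNat : Int) - 1) 2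
      else acc) 0
  decide (p ≤ total)

-- ===== PRECONDITION & SPEC =====
-- Pre_good excludes only inputs on which A never returns: cooks > len(ranks)
-- (IndexError) and a scheduled cook of rank r ≤ 0 with currentmintime ≥ r
-- (A's while loop never terminates).
def Pre_good (currentmintime : Int) (p : Int) (cooks : Int) (ranks : List Int) : Prop :=
  cooks ≤ (ranks.length : Int) ∧
  ∀ r ∈ ranks.take cooks.toNat, 1 ≤ r ∨ currentmintime < r

instance (currentmintime : Int) (p : Int) (cooks : Int) (ranks : List Int) : Decidable (Pre_good currentmintime p cooks ranks) := by unfold Pre_good; infer_instance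

def pvWitness_good : Int × Int × Int × List Int := (10, 3, 2, [1, 2])

def Spec_good (currentmintime : Int) (p : Int) (cooks : Int) (ranks : List Int) (out : Bool) : Prop := out = good_alt currentmintime p cooks ranks
instance (currentmintime : Int) (p : Int) (cooks : Int) (ranks : List Int) (out : Bool) : Decidable (Spec_good currentmintime p cooks ranks out) := by unfold Spec_good; infer_instance

-- ===== CLAIM (what is proved, stated in full; the proofs are below) =====
def Claim_equal_good : Prop := ∀ (currentmintime : Int) (p : Int) (cooks : Int) (ranks : List Int), Dom_good currentmintime p cooks ranks → Pre_good currentmintime p cooks ranks → Spec_good currentmintime p cooks ranks (good currentmintime p cooks ranks)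

-- ===== LEMMAS AND PROOFS =====

-- The closed-form prata count of one cook (B's per-cook term).
def cookTerm (cmt r : Int) : Int :=
  if r ≤ cmt then
    PySem.Int.floordiv ((Nat.sqrt (8 * PySem.Int.floordiv cmt r + 1).toNat : Int) - 1) 2
  else 0

-- k = (isqrt(8m+1)-1)//2 is the largest k with k(k+1) ≤ 2m.
lemma sqrt_bracket (m : Nat) :
    ((Nat.sqrt (8 * m + 1) - 1) / 2) * ((Nat.sqrt (8 * m + 1) - 1) / 2 + 1) ≤ 2 * m ∧
    2 * m < ((Nat.sqrt (8 * m + 1) - 1) / 2 + 1) * ((Nat.sqrt (8 * m + 1) - 1) / 2 + 2) := by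
  have hs1 := Nat.sqrt_le' (8 * m + 1)
  have hs2 := Nat.lt_succ_sqrt' (8 * m + 1)
  set s := Nat.sqrt (8 * m + 1) with hsdef
  have hs : 1 ≤ s := by
    have : 0 < Nat.sqrt (8 * m + 1) := Nat.sqrt_pos.mpr (by omega)
    omega
  set k := (s - 1) / 2 with hkdef
  have h1 : 2 * k + 1 ≤ s := by omega
  have h2 : s ≤ 2 * k + 2 := by omega
  constructor
  · nlinarith
  · nlinarith

-- A's inner loop, run with enough fuel, counts exactly K pratas, where K is
-- bracketed by r*K*(K+1) ≤ 2*cmt < r*(K+1)*(K+2).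
lemma goodLoop_run (cmt r K : Int) (hr : 1 ≤ r) (hK0 : 0 ≤ K)
    (hK1 : r * (K * (K + 1)) ≤ 2 * cmt) (hK2 : 2 * cmt < r * ((K + 1) * (K + 2))) :
    ∀ (fuel : Nat) (j t cnt : Int), 1 ≤ j → j - 1 ≤ K → 2 * t = r * ((j - 1) * j) →
      K - (j - 1) < (fuel : Int) →
      goodLoop cmt r fuel t j cnt = cnt + (K - (j - 1)) := by
  intro fuel
  induction fuel with
  | zero => intro j t cnt hj hjK ht hf; omega
  | succ n ih =>
    intro j t cnt hj hjK ht hf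
    simp only [goodLoop]
    have h2t' : 2 * (t + j * r) = r * (j * (j + 1)) := by ring_nf; nlinarith [ht]
    by_cases hbr : cmt < t + j * r
    · simp only [hbr, if_true]
      -- the loop broke: K = j - 1
      have hlt : r * (K * (K + 1)) < r * (j * (j + 1)) := by omega
      have hKj : K < j := by
        by_contra hcon
        push_neg at hcon
        have h1 : j * (j + 1) ≤ K * (K + 1) := by nlinarith
        have := mul_le_mul_of_nonneg_left h1 (show (0:Int) ≤ r by omega)
        omega
      omega
    · simp only [hbr, if_false]
      have hle : r * (j * (j + 1)) ≤ 2 * cmt := by omega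
      have hlt2 : r * (j * (j + 1)) < r * ((K + 1) * (K + 2)) := by omega
      have hjK' : j ≤ K := by
        by_contra hcon
        push_neg at hcon
        have h1 : (K + 1) * (K + 2) ≤ j * (j + 1) := by nlinarith
        have := mul_le_mul_of_nonneg_left h1 (show (0:Int) ≤ r by omega)
        omega
      have := ih (j + 1) (t + j * r) (cnt + 1) (by omega) (by omega)
        (by rw [h2t']; ring_nf) (by push_cast at hf ⊢; omega)
      rw [this]; omega

lemma term_eval (S : Nat) (hS : 1 ≤ S) : ((S : Int) - 1) / 2 = (((S - 1) / 2 : Nat) : Int) := by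
  omega

-- One cook: A's simulation equals B's closed form, for any starting count.
lemma cook_eq (cmt r cnt : Int) (hr : 1 ≤ r ∨ cmt < r) :
    goodLoop cmt r (cmt.toNat + 2) 0 1 cnt = cnt + cookTerm cmt r := by
  by_cases hrc : r ≤ cmt
  · -- then 1 ≤ r (the cmt < r disjunct is impossible)
    have hr1 : 1 ≤ r := hr.resolve_right (not_lt.mpr hrc)
    have hcmt1 : 1 ≤ cmt := le_trans hr1 hrc
    set q := PySem.Int.floordiv cmt r with hqdef
    have hq1 : r * q ≤ cmt := by
      have : q ≤ q ↔ q * r ≤ cmt := PySem.Int.le_floordiv_iff_mul_le (by omega)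
      nlinarith [this.mp le_rfl]
    have hq2 : cmt < r * (q + 1) := by
      have : q < q + 1 ↔ cmt < (q + 1) * r := PySem.Int.floordiv_lt_iff_lt_mul (by omega)
      nlinarith [this.mp (by omega)]
    have hq0 : 1 ≤ q := by nlinarith
    set m := q.toNat with hmdef
    have hqm : q = (m : Int) := by omega
    have hbr := sqrt_bracket m
    set k := (Nat.sqrt (8 * m + 1) - 1) / 2 with hkdef
    -- bracket for K = ↑k over the integers
    have hK1 : r * ((k : Int) * ((k : Int) + 1)) ≤ 2 * cmt := by
      have : ((k * (k + 1) : Nat) : Int) ≤ ((2 * m : Nat) : Int) := by exact_mod_cast hbr.1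
      push_cast at this
      nlinarith
    have hK2 : 2 * cmt < r * (((k : Int) + 1) * ((k : Int) + 2)) := by
      have he : 2 ∣ (k + 1) * (k + 2) := (Nat.even_mul_succ_self (k + 1)).two_dvd
      have hlt : 2 * m < (k + 1) * (k + 2) := hbr.2
      have h2 : 2 * m + 2 ≤ (k + 1) * (k + 2) := by omega
      have h2' : 2 * (m : Int) + 2 ≤ ((k : Int) + 1) * ((k : Int) + 2) := by exact_mod_cast h2
      nlinarith
    have hKc : (k : Int) ≤ cmt := by nlinarith [sq_nonneg ((k : Int))]
    have hfuel : (k : Int) - 0 < ((cmt.toNat + 2 : Nat) : Int) := by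
      push_cast; omega
    have hrun := goodLoop_run cmt r (k : Int) hr1 (by positivity) hK1 hK2
      (cmt.toNat + 2) 1 0 cnt (by omega) (by omega) (by ring) (by omega)
    rw [hrun]
    -- B's term computes ↑k
    have hterm : cookTerm cmt r = (k : Int) := by
      unfold cookTerm
      rw [if_pos hrc, ← hqdef, hqm]
      have h8 : ((8 * (m : Int) + 1).toNat) = 8 * m + 1 := by omega
      rw [h8, PySem.Int.floordiv_eq_ediv_of_pos (by norm_num), hkdef]
      exact term_eval _ (Nat.sqrt_pos.mpr (by omega))
    omega
  · -- cmt < r: the loop breaks on its first prata; B adds nothing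
    have hlt : cmt < r := by omega
    simp [goodLoop, cookTerm, hrc, hlt]

-- The two folds agree element by element.
lemma fold_eq (cmt : Int) (ranks : List Int) :
    ∀ (idxs : List Nat) (acc : Int),
      (∀ i ∈ idxs, 1 ≤ (PySem.List.pyGet? ranks (i : Int)).getD 0 ∨
                   cmt < (PySem.List.pyGet? ranks (i : Int)).getD 0) →
      idxs.foldl (fun (cnt : Int) (i : Nat) =>
          goodLoop cmt ((PySem.List.pyGet? ranks (i : Int)).getD 0) (cmt.toNat + 2) 0 1 cnt) acc
      = idxs.foldl (fun (acc : Int) (i : Nat) =>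
          let r := (PySem.List.pyGet? ranks (i : Int)).getD 0
          if r ≤ cmt then
            acc + PySem.Int.floordiv ((Nat.sqrt (8 * PySem.Int.floordiv cmt r + 1).toNat : Int) - 1) 2
          else acc) acc := by
  intro idxs
  induction idxs with
  | nil => intro acc _; rfl
  | cons i is ih =>
    intro acc h
    simp only [List.foldl_cons]
    rw [cook_eq cmt _ acc (h i (by simp))]
    rw [ih _ (fun j hj => h j (by simp [hj]))]
    congr 1
    unfold cookTerm
    split_ifs <;> omega

theorem good_spec_aux (currentmintime p cooks : Int) (ranks : List Int)
    (hpre : Pre_good currentmintime p cooks ranks) :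
    good currentmintime p cooks ranks = good_alt currentmintime p cooks ranks := by
  obtain ⟨hlen, hranks⟩ := hpre
  unfold good good_alt
  refine congrArg (fun z => decide (p ≤ z)) (fold_eq currentmintime ranks (List.range cooks.toNat) 0 ?_)
  intro i hi
  rw [List.mem_range] at hi
  have hilen : i < ranks.length := by omega
  rw [PySem.List.pyGet?_natCast, List.getElem?_eq_getElem hilen]
  simp only [Option.getD_some]
  apply hranks
  have hlt : i < (List.take cooks.toNat ranks).length := by
    simp [List.length_take]; omega
  have := List.getElem_take (xs := ranks) (j := cooks.toNat) (i := i) (h := hlt)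
  rw [← this]
  exact List.getElem_mem _

-- ===== VERDICT (by name: the statement is the Claim_ definition above) =====
theorem good_spec : Claim_equal_good := by
  intro currentmintime p cooks ranks _ hpre
  exact good_spec_aux currentmintime p cooks ranks hpre
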